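-- pv_equiv track=rewrite | github.com/Flamesword33/python-projects | 2023/critical_rolls_proof.py | roll_dc_without_crit
-- ===== SOURCE A (Python) =====
-- def roll_dc_without_crit(dc):
--     damage = 0
--     for roll in range(1,21):
--         if roll < dc:
--             damage = damage + 14
--         else:
--             damage = damage + 7
--     return damage
-- ===== SOURCE B (Python) =====
-- def roll_dc_without_crit(dc):
--     count = min(20, max(0, dc - 1))  # number of rolls in 1..20 strictly below dc
--     return 14 * count + 7 * (20 - count)
-- ===== Notes on version B (the rewrite author's own statement) =====
-- stated objective: simpler
-- what changed: Replaced the fixed 20-iteration loop with a closed-form count of rolls below dc and one arithmetic expression.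
import Mathlib
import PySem

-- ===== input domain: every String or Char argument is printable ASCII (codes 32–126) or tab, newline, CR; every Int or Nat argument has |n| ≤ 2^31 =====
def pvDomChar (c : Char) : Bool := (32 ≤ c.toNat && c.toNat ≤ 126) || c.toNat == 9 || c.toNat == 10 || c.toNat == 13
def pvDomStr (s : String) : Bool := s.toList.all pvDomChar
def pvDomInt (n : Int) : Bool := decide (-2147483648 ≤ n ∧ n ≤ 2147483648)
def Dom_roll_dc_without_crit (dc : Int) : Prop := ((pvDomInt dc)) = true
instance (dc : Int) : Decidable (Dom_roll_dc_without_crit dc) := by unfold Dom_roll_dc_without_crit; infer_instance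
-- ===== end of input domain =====

-- B replaces A's fixed 20-iteration loop with a closed-form clamped count (objective: simpler).


-- ===== PORT A =====
def roll_dc_without_crit (dc : Int) : Int :=
  (PySem.List.pyRange 1 21 1).foldl
    (fun damage roll => if roll < dc then damage + 14 else damage + 7) 0

-- ===== PORT B =====
-- B: closed form — count = clamp(dc-1, 0, 20), damage = 14*count + 7*(20-count)
def roll_dc_without_crit_alt (dc : Int) : Int :=
  let count := min 20 (max 0 (dc - 1))
  14 * count + 7 * (20 - count)

-- ===== PRECONDITION & SPEC =====
def Spec_roll_dc_without_crit (dc : Int) (out : Int) : Prop := out = roll_dc_without_crit_alt dc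
instance (dc : Int) (out : Int) : Decidable (Spec_roll_dc_without_crit dc out) := by unfold Spec_roll_dc_without_crit; infer_instance

-- ===== CLAIM (what is proved, stated in full; the proofs are below) =====
def Claim_equal_roll_dc_without_crit : Prop := ∀ (dc : Int), Dom_roll_dc_without_crit dc → Spec_roll_dc_without_crit dc (roll_dc_without_crit dc)

-- ===== LEMMAS AND PROOFS =====

-- ===== VERDICT (by name: the statement is the Claim_ definition above) =====
-- The loop over a..a+n-1 adds 7 per roll plus 7 per roll strictly below dc.
theorem roll_dc_loop (dc : Int) (n : Nat) (a acc : Int) :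
    ((List.range n).map (fun k : Nat => a + (k : Int))).foldl
      (fun damage roll => if roll < dc then damage + 14 else damage + 7) acc
    = acc + 7 * n + 7 * min (n : Int) (max 0 (dc - a)) := by
  induction n generalizing acc with
  | zero => simp
  | succ n ih =>
    rw [List.range_succ, List.map_append, List.foldl_append, ih]
    simp only [List.map_cons, List.map_nil, List.foldl_cons, List.foldl_nil]
    push_cast
    split_ifs with h <;> omega

theorem roll_dc_without_crit_spec : Claim_equal_roll_dc_without_crit := by
  intro dc _
  show roll_dc_without_crit dc = roll_dc_without_crit_alt dc
  simp only [roll_dc_without_crit, roll_dc_without_crit_alt, PySem.List.pyRange]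
  norm_num [show Int.toNat 20 = 20 from rfl, roll_dc_loop dc 20 1 0]
  omega
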